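-- pv_equiv track=rewrite | github.com/sese2204/coding-test | 백준/Gold/16234. 인구 이동/인구 이동.py | bfs
-- ===== SOURCE A (Python) =====
-- from collections import deque
--
-- dx = [1, -1, 0, 0]
--
-- dy = [0, 0, 1, -1]
--
-- def bfs(a, L, R): # check 만들고 탐색하면 좌표 저장하고 인구이동
--   n = len(a)
--   c = [[False] * n for _ in range(n)]
--   ok = False
--   for i in range(n):
--     for j in range(n):
--       if c[i][j] == False:
--         q = deque()
--         q.append((i, j))
--         c[i][j] = True
--         s = [(i,j)]
--         total = a[i][j]
--         while q:
--           x, y = q.popleft()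
--           for k in range(4):
--             nx, ny = x+dx[k], y+dy[k]
--             if 0 <= nx < n and 0 <= ny < n and c[nx][ny] == False:
--               diff = abs(a[x][y] - a[nx][ny])
--               if L <= diff <= R:
--                 q.append((nx, ny))
--                 c[nx][ny] = True
--                 s.append((nx, ny))
--                 total += a[nx][ny]
--                 ok = True
--         for x,y in s:
--           a[x][y] = total // len(s)
--   return ok
-- ===== SOURCE B (Python) =====
-- # B returns A's ok flag directly: True iff some adjacent in-bounds pair differs by d with L <= d <= R.
-- # Note: A mutates `a` in place (the migration averaging); B does not — the equivalence is about the return value only.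
-- def bfs(a, L, R):
--     n = len(a)
--     return any(
--         (j + 1 < n and L <= abs(a[i][j] - a[i][j + 1]) <= R)
--         or (i + 1 < n and L <= abs(a[i][j] - a[i + 1][j]) <= R)
--         for i in range(n) for j in range(n)
--     )
-- ===== Notes on version B (the rewrite author's own statement) =====
-- stated objective: simpler
-- what changed: A computes the returned flag by a BFS flood-fill (visited grid, deque, per-component sums and in-place averaging); B returns the same flag by a single early-exit scan over right/down neighbour pairs testing L <= |diff| <= R (A mutates `a` in place, B does not; the equivalence is about the return value).
import Mathlib
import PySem

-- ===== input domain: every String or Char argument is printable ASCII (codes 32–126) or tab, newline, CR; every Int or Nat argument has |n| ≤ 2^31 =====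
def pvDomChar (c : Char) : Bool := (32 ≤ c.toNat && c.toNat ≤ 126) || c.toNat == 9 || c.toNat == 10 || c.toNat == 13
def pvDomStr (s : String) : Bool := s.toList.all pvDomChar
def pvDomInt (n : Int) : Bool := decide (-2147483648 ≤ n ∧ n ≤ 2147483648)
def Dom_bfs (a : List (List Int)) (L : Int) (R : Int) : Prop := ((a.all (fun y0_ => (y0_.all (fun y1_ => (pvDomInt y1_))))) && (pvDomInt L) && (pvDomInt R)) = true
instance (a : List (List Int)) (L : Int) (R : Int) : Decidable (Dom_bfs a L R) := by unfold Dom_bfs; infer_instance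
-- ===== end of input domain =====

-- B replaces A's BFS flood-fill (visited grid, deque, per-component averaging) by a single scan for an
-- adjacent pair whose difference lies in [L,R]; A mutates `a` in place (the migration), B does not — the
-- equivalence proved is about the RETURN value only.

-- ===== PORT A =====
-- module constants dx, dy
def dxA : List Int := [1, -1, 0, 0]
def dyA : List Int := [0, 0, 1, -1]

-- a[x][y] / c[x][y]: every access in A is guarded by 0 <= x < n and 0 <= y < n (seeds come from
-- range(n), neighbours are bounds-checked before the access), so `.toNat`-based indexing is exact here.
def gget (a : List (List Int)) (x y : Int) : Int := (a.getD x.toNat []).getD y.toNat 0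
def bget (c : List (List Bool)) (x y : Int) : Bool := (c.getD x.toNat []).getD y.toNat false
def bset (c : List (List Bool)) (x y : Int) : List (List Bool) :=
  c.set x.toNat ((c.getD x.toNat []).set y.toNat true)
def iset (a : List (List Int)) (x y v : Int) : List (List Int) :=
  a.set x.toNat ((a.getD x.toNat []).set y.toNat v)

-- the mutable state of one seed round: a (mutated in place), c, q, s, total, ok
structure BfsSt where
  a : List (List Int)
  c : List (List Bool)
  q : List (Int × Int)
  s : List (Int × Int)
  total : Int
  ok : Bool

-- fuel for the while loop: number of False cells in c plus pending queue entries
def falseCount (c : List (List Bool)) : Nat := (c.map (fun r => r.count false)).sum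

-- body of `for k in range(4)` for the popped (x, y)
def nbrStep (n : Nat) (L R : Int) (x y : Int) (st : BfsSt) (k : Nat) : BfsSt :=
  let nx := x + dxA.getD k 0
  let ny := y + dyA.getD k 0
  if 0 ≤ nx ∧ nx < (n : Int) ∧ 0 ≤ ny ∧ ny < (n : Int) ∧ bget st.c nx ny = false then
    let diff := |gget st.a x y - gget st.a nx ny|
    if L ≤ diff ∧ diff ≤ R then
      ⟨st.a, bset st.c nx ny, st.q ++ [(nx, ny)], st.s ++ [(nx, ny)],
       st.total + gget st.a nx ny, true⟩
    else st
  else st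

-- `while q:` — fuel-bounded transcription; the fuel passed below provably suffices
def whileLoop (n : Nat) (L R : Int) : Nat → BfsSt → BfsSt
  | 0, st => st
  | fuel + 1, st =>
    match st.q with
    | [] => st
    | (x, y) :: q' =>
      whileLoop n L R fuel (List.foldl (nbrStep n L R x y) { st with q := q' } [0, 1, 2, 3])

-- `for x,y in s: a[x][y] = total // len(s)`
def writeAvg (s : List (Int × Int)) (v : Int) (a : List (List Int)) : List (List Int) :=
  s.foldl (fun a p => iset a p.1 p.2 v) a

-- body of the double `for i in range(n): for j in range(n):` loop
def seedStep (n : Nat) (L R : Int) (acc : List (List Int) × List (List Bool) × Bool)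
    (i j : Nat) : List (List Int) × List (List Bool) × Bool :=
  if bget acc.2.1 (i : Int) (j : Int) = false then
    let st0 : BfsSt := ⟨acc.1, bset acc.2.1 (i : Int) (j : Int),
      [((i : Int), (j : Int))], [((i : Int), (j : Int))],
      gget acc.1 (i : Int) (j : Int), acc.2.2⟩
    let st := whileLoop n L R (falseCount st0.c + st0.q.length + 1) st0
    (writeAvg st.s (PySem.Int.floordiv st.total (st.s.length : Int)) st.a, st.c, st.ok)
  else acc

def bfs (a : List (List Int)) (L : Int) (R : Int) : Bool :=
  let n := a.length
  let init : List (List Int) × List (List Bool) × Bool :=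
    (a, List.replicate n (List.replicate n false), false)
  let res := (List.range n).foldl
    (fun acc i => (List.range n).foldl (fun acc j => seedStep n L R acc i j) acc) init
  res.2.2

-- ===== PORT B =====
-- helper `near`
def nearB (L R u v : Int) : Bool := decide (L ≤ |u - v|) && decide (|u - v| ≤ R)

def bfs_alt (a : List (List Int)) (L : Int) (R : Int) : Bool :=
  let n := a.length
  (List.range n).any fun i => (List.range n).any fun j =>
    (decide (j + 1 < n) && nearB L R (gget a (i : Int) (j : Int)) (gget a (i : Int) ((j : Int) + 1)))
    || (decide (i + 1 < n) && nearB L R (gget a (i : Int) (j : Int)) (gget a ((i : Int) + 1) (j : Int)))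

-- ===== PRECONDITION & SPEC =====
-- Pre_ excludes exactly the ragged grids (some row shorter than len(a)), on which Python A raises IndexError.
def Pre_bfs (a : List (List Int)) (L : Int) (R : Int) : Prop := ∀ r ∈ a, a.length ≤ r.length
instance (a : List (List Int)) (L : Int) (R : Int) : Decidable (Pre_bfs a L R) := by
  unfold Pre_bfs; infer_instance

def pvWitness_bfs : List (List Int) × Int × Int := ([[1, 2], [5, 9]], 1, 3)

def Spec_bfs (a : List (List Int)) (L : Int) (R : Int) (out : Bool) : Prop := out = bfs_alt a L R
instance (a : List (List Int)) (L : Int) (R : Int) (out : Bool) : Decidable (Spec_bfs a L R out) := by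
  unfold Spec_bfs; infer_instance

-- ===== CLAIM (what is proved, stated in full; the proofs are below) =====
def Claim_equal_bfs : Prop := ∀ (a : List (List Int)) (L : Int) (R : Int),
  Dom_bfs a L R → Pre_bfs a L R → Spec_bfs a L R (bfs a L R)

-- ===== LEMMAS AND PROOFS =====

-- coordinates, adjacency and the qualifying-pair predicate (proof-only abstractions)
def InR (n : Nat) (p : Int × Int) : Prop :=
  0 ≤ p.1 ∧ p.1 < (n : Int) ∧ 0 ≤ p.2 ∧ p.2 < (n : Int)

def nbrsOf (p : Int × Int) : List (Int × Int) :=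
  [(p.1 + 1, p.2), (p.1 - 1, p.2), (p.1, p.2 + 1), (p.1, p.2 - 1)]

def Qual (L R u v : Int) : Prop := L ≤ |u - v| ∧ |u - v| ≤ R

def gg (a : List (List Int)) (p : Int × Int) : Int := gget a p.1 p.2

def NoQ (a0 : List (List Int)) (L R : Int) (p : Int × Int) : Prop :=
  ∀ q ∈ nbrsOf p, InR a0.length q → ¬ Qual L R (gg a0 p) (gg a0 q)

def HasPair (a0 : List (List Int)) (L R : Int) : Prop :=
  ∃ p q, InR a0.length p ∧ InR a0.length q ∧ q ∈ nbrsOf p ∧ Qual L R (gg a0 p) (gg a0 q)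

-- inner-loop invariant (everything except the ok=false bookkeeping)
structure Inv2 (a0 : List (List Int)) (L R : Int) (st : BfsSt) : Prop where
  clen : st.c.length = a0.length
  crow : ∀ i < a0.length, (st.c.getD i []).length = a0.length
  alen : st.a.length = a0.length
  agreeF : ∀ p, InR a0.length p → bget st.c p.1 p.2 = false → gg st.a p = gg a0 p
  agreeS : ∀ p ∈ st.s, gg st.a p = gg a0 p
  qs : ∀ p ∈ st.q, p ∈ st.s
  sIn : ∀ p ∈ st.s, InR a0.length p
  sMark : ∀ p ∈ st.s, bget st.c p.1 p.2 = true
  okS : st.ok = true → HasPair a0 L R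

def OkF (a0 : List (List Int)) (L R : Int) (st : BfsSt) : Prop :=
  st.ok = false → st.q.length ≤ 1 ∧
    ∀ p, InR a0.length p → bget st.c p.1 p.2 = true → p ∈ st.q ∨ NoQ a0 L R p

-- outer-loop invariant
structure OInv (a0 : List (List Int)) (L R : Int)
    (acc : List (List Int) × List (List Bool) × Bool) : Prop where
  clen : acc.2.1.length = a0.length
  crow : ∀ i < a0.length, (acc.2.1.getD i []).length = a0.length
  alen : acc.1.length = a0.length
  agreeF : ∀ p, InR a0.length p → bget acc.2.1 p.1 p.2 = false → gg acc.1 p = gg a0 p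
  okS : acc.2.2 = true → HasPair a0 L R
  okF : acc.2.2 = false → ∀ p, InR a0.length p → bget acc.2.1 p.1 p.2 = true → NoQ a0 L R p

-- ---- list access lemmas ----
theorem getD_set_self {α : Type} (l : List α) (n : Nat) (a d : α) (h : n < l.length) :
    (l.set n a).getD n d = a := by
  simp [List.getD_eq_getElem?_getD, h]

theorem getD_set_ne {α : Type} (l : List α) (n m : Nat) (a : α) (d : α) (h : n ≠ m) :
    (l.set n a).getD m d = l.getD m d := by
  simp [List.getD_eq_getElem?_getD, List.getElem?_set_ne h]

theorem bget_bset_self (c : List (List Bool)) (x y : Int)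
    (hx : x.toNat < c.length) (hy : y.toNat < (c.getD x.toNat []).length) :
    bget (bset c x y) x y = true := by
  unfold bget bset
  rw [getD_set_self _ _ _ _ (by simpa using hx), getD_set_self _ _ _ _ hy]

theorem bget_bset_other (c : List (List Bool)) (x y x' y' : Int)
    (h : (x'.toNat, y'.toNat) ≠ (x.toNat, y.toNat)) :
    bget (bset c x y) x' y' = bget c x' y' := by
  unfold bget bset
  by_cases hx : x.toNat = x'.toNat
  · rw [← hx]
    have hy : y.toNat ≠ y'.toNat := by simp at h; omega
    by_cases hlt : x.toNat < c.length
    · rw [getD_set_self _ _ _ _ hlt, getD_set_ne _ _ _ _ _ hy]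
    · rw [List.set_eq_of_length_le (by omega)]
  · rw [getD_set_ne _ _ _ _ _ hx]

theorem gget_iset_other (a : List (List Int)) (x y v x' y' : Int)
    (h : (x'.toNat, y'.toNat) ≠ (x.toNat, y.toNat)) :
    gget (iset a x y v) x' y' = gget a x' y' := by
  unfold gget iset
  by_cases hx : x.toNat = x'.toNat
  · rw [← hx]
    have hy : y.toNat ≠ y'.toNat := by simp at h; omega
    by_cases hlt : x.toNat < a.length
    · rw [getD_set_self _ _ _ _ hlt, getD_set_ne _ _ _ _ _ hy]
    · rw [List.set_eq_of_length_le (by omega)]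
  · rw [getD_set_ne _ _ _ _ _ hx]

theorem length_bset (c : List (List Bool)) (x y : Int) : (bset c x y).length = c.length := by
  simp [bset]

theorem rowlen_bset (c : List (List Bool)) (x y : Int) (i : Nat) :
    ((bset c x y).getD i []).length = (c.getD i []).length := by
  unfold bset
  by_cases hx : x.toNat = i
  · subst hx
    by_cases hlt : x.toNat < c.length
    · rw [getD_set_self _ _ _ _ hlt]; simp
    · rw [List.set_eq_of_length_le (by omega)]
  · rw [getD_set_ne _ _ _ _ _ hx]

theorem length_iset (a : List (List Int)) (x y v : Int) : (iset a x y v).length = a.length := by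
  simp [iset]

-- coordinate helpers
theorem inr_eta {n : Nat} {p : Int × Int} (h : InR n p) :
    ((p.1.toNat : Int), (p.2.toNat : Int)) = p := by
  obtain ⟨h1, _, h3, _⟩ := h
  simp [Int.toNat_of_nonneg h1, Int.toNat_of_nonneg h3]

theorem inr_inj {n : Nat} {p q : Int × Int} (hp : InR n p) (hq : InR n q)
    (h : (p.1.toNat, p.2.toNat) = (q.1.toNat, q.2.toNat)) : p = q := by
  obtain ⟨a1, _, a3, _⟩ := hp; obtain ⟨b1, _, b3, _⟩ := hq
  simp at h
  have : p.1 = q.1 := by omega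
  have : p.2 = q.2 := by omega
  exact Prod.ext ‹p.1 = q.1› ‹p.2 = q.2›

theorem qual_symm {L R u v : Int} (h : Qual L R u v) : Qual L R v u := by
  unfold Qual at *; rw [abs_sub_comm]; exact h

theorem mem_nbrs_symm {p q : Int × Int} (h : q ∈ nbrsOf p) : p ∈ nbrsOf q := by
  simp [nbrsOf, Prod.ext_iff] at h ⊢
  rcases h with ⟨h1, h2⟩ | ⟨h1, h2⟩ | ⟨h1, h2⟩ | ⟨h1, h2⟩ <;> omega

theorem nbr_ne {p q : Int × Int} (h : q ∈ nbrsOf p) : q ≠ p := by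
  simp [nbrsOf] at h
  rcases h with h | h | h | h <;> subst h <;> simp [Prod.ext_iff]

-- falseCount lemmas
theorem count_set_true (r : List Bool) (y : Nat) (hy : y < r.length)
    (hv : r.getD y false = false) :
    (r.set y true).count false + 1 = r.count false := by
  induction r generalizing y with
  | nil => simp at hy
  | cons b rs ih =>
    cases y with
    | zero => simp at hv; subst hv; simp
    | succ m =>
      simp at hy hv
      have := ih m (by omega) (by simpa [List.getD] using hv)
      simp [List.count_cons]
      omega

theorem sum_map_set {α : Type} (c : List α) (x : Nat) (r : α) (f : α → Nat) (hx : x < c.length) :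
    ((c.set x r).map f).sum + f (c.getD x r) = (c.map f).sum + f r := by
  induction c generalizing x with
  | nil => simp at hx
  | cons h t ih =>
    cases x with
    | zero => simp [List.getD]; omega
    | succ m =>
      simp only [List.length_cons] at hx
      have := ih m (by omega)
      simp only [List.set_cons_succ, List.map_cons, List.sum_cons, List.getD_cons_succ] at *
      omega

theorem getD_irrel {α : Type} (l : List α) (x : Nat) (d1 d2 : α) (hx : x < l.length) :
    l.getD x d1 = l.getD x d2 := by
  simp [List.getD_eq_getElem?_getD, List.getElem?_eq_getElem hx]

theorem falseCount_bset (c : List (List Bool)) (x y : Int)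
    (hx : x.toNat < c.length) (hy : y.toNat < (c.getD x.toNat []).length)
    (hv : bget c x y = false) :
    falseCount (bset c x y) + 1 = falseCount c := by
  unfold falseCount bset
  have h1 := count_set_true (c.getD x.toNat []) y.toNat hy (by unfold bget at hv; exact hv)
  have h2 := sum_map_set c x.toNat ((c.getD x.toNat []).set y.toNat true)
      (fun r => r.count false) hx
  rw [getD_irrel c x.toNat ((c.getD x.toNat []).set y.toNat true) [] hx] at h2
  simp only at h2
  omega

-- ---- nbrStep characterization ----
theorem nbrStep_cases (n : Nat) (L R x y : Int) (st : BfsSt) (k : Nat) :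
    nbrStep n L R x y st k = st ∨
    (InR n (x + dxA.getD k 0, y + dyA.getD k 0) ∧
     bget st.c (x + dxA.getD k 0) (y + dyA.getD k 0) = false ∧
     Qual L R (gget st.a x y) (gget st.a (x + dxA.getD k 0) (y + dyA.getD k 0)) ∧
     nbrStep n L R x y st k =
       ⟨st.a, bset st.c (x + dxA.getD k 0) (y + dyA.getD k 0),
        st.q ++ [(x + dxA.getD k 0, y + dyA.getD k 0)],
        st.s ++ [(x + dxA.getD k 0, y + dyA.getD k 0)],
        st.total + gget st.a (x + dxA.getD k 0) (y + dyA.getD k 0), true⟩) := by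
  simp only [nbrStep]
  split_ifs with h1 h2
  · exact Or.inr ⟨⟨h1.1, h1.2.1, h1.2.2.1, h1.2.2.2.1⟩, h1.2.2.2.2, h2, rfl⟩
  · exact Or.inl rfl
  · exact Or.inl rfl

theorem nbrStep_fires (n : Nat) (L R x y : Int) (st : BfsSt) (k : Nat)
    (hIn : InR n (x + dxA.getD k 0, y + dyA.getD k 0))
    (hF : bget st.c (x + dxA.getD k 0) (y + dyA.getD k 0) = false)
    (hQ : Qual L R (gget st.a x y) (gget st.a (x + dxA.getD k 0) (y + dyA.getD k 0))) :
    (nbrStep n L R x y st k).ok = true := by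
  obtain ⟨h1, h2, h3, h4⟩ := hIn
  simp only [nbrStep]
  unfold Qual at hQ
  rw [if_pos ⟨h1, h2, h3, h4, hF⟩, if_pos hQ]

theorem nbrStep_ok_mono (n : Nat) (L R x y : Int) (st : BfsSt) (k : Nat)
    (h : st.ok = true) : (nbrStep n L R x y st k).ok = true := by
  rcases nbrStep_cases n L R x y st k with hc | ⟨_, _, _, hc⟩ <;> rw [hc]
  exact h

theorem fold_ok_mono (n : Nat) (L R x y : Int) (ks : List Nat) (st : BfsSt)
    (h : st.ok = true) : (List.foldl (nbrStep n L R x y) st ks).ok = true := by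
  induction ks generalizing st with
  | nil => exact h
  | cons k ks ih => exact ih _ (nbrStep_ok_mono n L R x y st k h)

theorem fold_ok_false (n : Nat) (L R x y : Int) (ks : List Nat) (st : BfsSt)
    (h : (List.foldl (nbrStep n L R x y) st ks).ok = false) :
    List.foldl (nbrStep n L R x y) st ks = st ∧
    ∀ k ∈ ks, InR n (x + dxA.getD k 0, y + dyA.getD k 0) →
      bget st.c (x + dxA.getD k 0) (y + dyA.getD k 0) = false →
      ¬ Qual L R (gget st.a x y) (gget st.a (x + dxA.getD k 0) (y + dyA.getD k 0)) := by
  induction ks generalizing st with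
  | nil => exact ⟨rfl, by simp⟩
  | cons k ks ih =>
    simp only [List.foldl_cons] at h ⊢
    have hk : nbrStep n L R x y st k = st := by
      rcases nbrStep_cases n L R x y st k with hc | ⟨_, _, _, hc⟩
      · exact hc
      · exfalso
        have := fold_ok_mono n L R x y ks (nbrStep n L R x y st k) (by rw [hc])
        rw [h] at this; exact Bool.false_ne_true this
    rw [hk] at h ⊢
    obtain ⟨he, hrest⟩ := ih st h
    refine ⟨he, ?_⟩
    intro k' hk' hIn hF
    rcases List.mem_cons.mp hk' with rfl | hmem
    · intro hQ
      have := nbrStep_fires n L R x y st k' hIn hF hQ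
      rw [hk] at this
      have hok : st.ok = false := by rw [he] at h; exact h
      rw [hok] at this; exact Bool.false_ne_true this
    · exact hrest k' hmem hIn hF

-- membership of a direction index in nbrsOf
theorem np_mem_nbrs (x y : Int) (k : Nat) (hk : k < 4) :
    (x + dxA.getD k 0, y + dyA.getD k 0) ∈ nbrsOf (x, y) := by
  interval_cases k <;> simp [dxA, dyA, nbrsOf] <;> omega

theorem np_big (x y : Int) (k : Nat) (hk : ¬ k < 4) :
    (x + dxA.getD k 0, y + dyA.getD k 0) = (x, y) := by
  have h1 : dxA.getD k 0 = 0 := by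
    apply List.getD_eq_default; simp [dxA]; omega
  have h2 : dyA.getD k 0 = 0 := by
    apply List.getD_eq_default; simp [dyA]; omega
  rw [h1, h2]; simp

-- one neighbour step preserves the invariant (and more)
theorem nbrStep_inv2 (a0 : List (List Int)) (L R x y : Int) (st : BfsSt) (k : Nat)
    (hxy : (x, y) ∈ st.s) (hI : Inv2 a0 L R st) :
    Inv2 a0 L R (nbrStep a0.length L R x y st k) ∧
    (nbrStep a0.length L R x y st k).a = st.a ∧
    (∀ p : Int × Int, bget st.c p.1 p.2 = true → bget (nbrStep a0.length L R x y st k).c p.1 p.2 = true) ∧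
    (∀ p : Int × Int, p ∈ st.s → p ∈ (nbrStep a0.length L R x y st k).s) ∧
    falseCount (nbrStep a0.length L R x y st k).c + (nbrStep a0.length L R x y st k).q.length
      ≤ falseCount st.c + st.q.length := by
  rcases nbrStep_cases a0.length L R x y st k with hc | ⟨hIn, hF, hQ, hc⟩
  · rw [hc]; exact ⟨hI, rfl, fun _ h => h, fun _ h => h, le_refl _⟩
  · set nx := x + dxA.getD k 0 with hnx
    set ny := y + dyA.getD k 0 with hny
    obtain ⟨i1, i2, i3, i4⟩ := hIn
    simp only at i1 i2 i3 i4
    have hxN : nx.toNat < st.c.length := by rw [hI.clen]; omega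
    have hyN : ny.toNat < (st.c.getD nx.toNat []).length := by
      rw [hI.crow nx.toNat (by omega)]; omega
    have hmono : ∀ p : Int × Int, bget st.c p.1 p.2 = true → bget (bset st.c nx ny) p.1 p.2 = true := by
      intro p hp
      by_cases he : (p.1.toNat, p.2.toNat) = (nx.toNat, ny.toNat)
      · have : bget (bset st.c nx ny) nx ny = true := bget_bset_self st.c nx ny hxN hyN
        unfold bget at hp this ⊢
        simp at he
        rw [he.1, he.2]; exact this
      · rw [bget_bset_other st.c nx ny p.1 p.2 he]; exact hp
    have hWasF : ∀ p : Int × Int, InR a0.length p → bget (bset st.c nx ny) p.1 p.2 = false →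
        bget st.c p.1 p.2 = false := by
      intro p hpIn hp
      by_cases he : (p.1.toNat, p.2.toNat) = (nx.toNat, ny.toNat)
      · exfalso
        have hself : bget (bset st.c nx ny) nx ny = true := bget_bset_self st.c nx ny hxN hyN
        unfold bget at hp hself
        simp at he
        rw [he.1, he.2] at hp
        rw [hp] at hself; exact Bool.false_ne_true hself
      · rw [bget_bset_other st.c nx ny p.1 p.2 he] at hp; exact hp
    rw [hc]
    refine ⟨⟨?_, ?_, ?_, ?_, ?_, ?_, ?_, ?_, ?_⟩, rfl, hmono, ?_, ?_⟩
    · simp [length_bset, hI.clen]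
    · intro i hi; rw [rowlen_bset]; exact hI.crow i hi
    · exact hI.alen
    · intro p hpIn hp
      exact hI.agreeF p hpIn (hWasF p hpIn hp)
    · intro p hp
      rcases List.mem_append.mp hp with hp | hp
      · exact hI.agreeS p hp
      · simp at hp; subst hp
        exact hI.agreeF (nx, ny) ⟨i1, i2, i3, i4⟩ hF
    · intro p hp
      rcases List.mem_append.mp hp with hp | hp
      · exact List.mem_append_left _ (hI.qs p hp)
      · exact List.mem_append_right _ hp
    · intro p hp
      rcases List.mem_append.mp hp with hp | hp
      · exact hI.sIn p hp
      · simp at hp; subst hp; exact ⟨i1, i2, i3, i4⟩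
    · intro p hp
      rcases List.mem_append.mp hp with hp | hp
      · exact hmono p (hI.sMark p hp)
      · simp at hp; subst hp
        exact bget_bset_self st.c nx ny hxN hyN
    · intro _
      by_cases hk : k < 4
      · refine ⟨(x, y), (nx, ny), hI.sIn (x, y) hxy, ⟨i1, i2, i3, i4⟩, np_mem_nbrs x y k hk, ?_⟩
        have e1 : gg a0 (x, y) = gget st.a x y := (hI.agreeS (x, y) hxy).symm
        have e2 : gg a0 (nx, ny) = gget st.a nx ny :=
          (hI.agreeF (nx, ny) ⟨i1, i2, i3, i4⟩ hF).symm
        unfold gg at e1 e2 ⊢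
        simp only at e1 e2 ⊢
        rw [e1, e2]; exact hQ
      · exfalso
        have := np_big x y k hk
        have h1 : nx = x := by rw [Prod.ext_iff] at this; exact this.1
        have h2 : ny = y := by rw [Prod.ext_iff] at this; exact this.2
        rw [h1, h2] at hF
        rw [hI.sMark (x, y) hxy] at hF
        simp at hF
    · intro p hp; exact List.mem_append_left _ hp
    · have := falseCount_bset st.c nx ny hxN hyN hF
      simp only [List.length_append, List.length_cons, List.length_nil]
      omega

theorem fold_inv2 (a0 : List (List Int)) (L R x y : Int) (ks : List Nat) (st : BfsSt)
    (hxy : (x, y) ∈ st.s) (hI : Inv2 a0 L R st) :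
    Inv2 a0 L R (List.foldl (nbrStep a0.length L R x y) st ks) ∧
    (List.foldl (nbrStep a0.length L R x y) st ks).a = st.a ∧
    (∀ p : Int × Int, bget st.c p.1 p.2 = true →
      bget (List.foldl (nbrStep a0.length L R x y) st ks).c p.1 p.2 = true) ∧
    falseCount (List.foldl (nbrStep a0.length L R x y) st ks).c +
      (List.foldl (nbrStep a0.length L R x y) st ks).q.length
      ≤ falseCount st.c + st.q.length := by
  induction ks generalizing st with
  | nil => exact ⟨hI, rfl, fun _ h => h, le_refl _⟩
  | cons k ks ih =>
    obtain ⟨hI1, ha1, hm1, hs1, hc1⟩ := nbrStep_inv2 a0 L R x y st k hxy hI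
    obtain ⟨hI2, ha2, hm2, hc2⟩ := ih (nbrStep a0.length L R x y st k) (hs1 _ hxy) hI1
    simp only [List.foldl_cons]
    exact ⟨hI2, by rw [ha2, ha1], fun p hp => hm2 p (hm1 p hp), le_trans hc2 hc1⟩

-- the while loop: invariants are preserved, the queue is emptied, a is untouched, c grows
theorem while_main (a0 : List (List Int)) (L R : Int) :
    ∀ (fuel : Nat) (st : BfsSt), Inv2 a0 L R st → OkF a0 L R st →
    falseCount st.c + st.q.length < fuel →
    Inv2 a0 L R (whileLoop a0.length L R fuel st) ∧
    OkF a0 L R (whileLoop a0.length L R fuel st) ∧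
    (whileLoop a0.length L R fuel st).q = [] ∧
    (whileLoop a0.length L R fuel st).a = st.a ∧
    (∀ p : Int × Int, bget st.c p.1 p.2 = true →
      bget (whileLoop a0.length L R fuel st).c p.1 p.2 = true) := by
  intro fuel
  induction fuel with
  | zero => intro st _ _ h; omega
  | succ fuel ih =>
    intro st hI hO hlt
    obtain ⟨sa, sc, sq, ss, stot, sok⟩ := st
    cases sq with
    | nil =>
      simp only [whileLoop]
      exact ⟨hI, hO, by trivial, by trivial, fun _ h => h⟩
    | cons hd q' =>
      obtain ⟨x, y⟩ := hd
      simp only [whileLoop]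
      set st1 : BfsSt := ⟨sa, sc, q', ss, stot, sok⟩ with hst1
      have hxy : (x, y) ∈ st1.s := hI.qs (x, y) (List.mem_cons_self)
      have hI1 : Inv2 a0 L R st1 :=
        ⟨hI.clen, hI.crow, hI.alen, hI.agreeF, hI.agreeS,
         fun p hp => hI.qs p (List.mem_cons_of_mem _ hp), hI.sIn, hI.sMark, hI.okS⟩
      set ks : List Nat := [0, 1, 2, 3] with hks
      set stF := List.foldl (nbrStep a0.length L R x y) st1 ks with hstF
      obtain ⟨hIF, haF, hmF, hcF⟩ := fold_inv2 a0 L R x y ks st1 hxy hI1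
      have hmeas : falseCount stF.c + stF.q.length < fuel := by
        have hcF' : falseCount stF.c + stF.q.length ≤ falseCount sc + q'.length := by
          simpa [hst1] using hcF
        simp only [List.length_cons] at hlt
        omega
      have hOF : OkF a0 L R stF := by
        intro hokF
        have hok1 : st1.ok = false := by
          cases hsok : st1.ok
          · rfl
          · exfalso
            have := fold_ok_mono a0.length L R x y ks st1 hsok
            rw [← hstF, hokF] at this; simp at this
        obtain ⟨heq, hnoq⟩ := fold_ok_false a0.length L R x y ks st1 (by rw [← hstF]; exact hokF)
        rw [← hstF] at heq
        obtain ⟨hq1, hcells⟩ := hO hok1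
        have hqsing : q' = [] := by
          simp only at hq1 ⊢
          simp only [List.length_cons] at hq1
          simpa using List.eq_nil_of_length_eq_zero (by omega)
        rw [heq]
        refine ⟨by simp [hst1, hqsing], ?_⟩
        intro p hpIn hpT
        right
        rcases hcells p hpIn hpT with hmem | hnq
        · -- p is the popped cell (x, y): show it has no qualifying neighbour
          have hpxy : p = (x, y) := by
            rcases List.mem_cons.mp hmem with h | h
            · exact h
            · rw [hqsing] at h; simp at h
          subst hpxy
          intro w hw hwIn hQw
          -- find the direction index k for w
          have hwk : ∃ k, k < 4 ∧ w = (x + dxA.getD k 0, y + dyA.getD k 0) := by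
            simp [nbrsOf] at hw
            rcases hw with h | h | h | h
            · exact ⟨0, by omega, by simp [dxA, dyA, h]⟩
            · exact ⟨1, by omega, by simp [dxA, dyA, h]; omega⟩
            · exact ⟨2, by omega, by simp [dxA, dyA, h]⟩
            · exact ⟨3, by omega, by simp [dxA, dyA, h]; omega⟩
          obtain ⟨k, hk4, hwk⟩ := hwk
          subst hwk
          cases hbw : bget st1.c (x + dxA.getD k 0) (y + dyA.getD k 0)
          · -- unvisited: this edge was inspected by the loop and found non-qualifying
            have hnq := hnoq k (by simp [hks]; omega) hwIn hbw
            apply hnq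
            have e1 : gget st1.a x y = gg a0 (x, y) := hI1.agreeS (x, y) hxy
            have e2 : gget st1.a (x + dxA.getD k 0) (y + dyA.getD k 0) =
                gg a0 (x + dxA.getD k 0, y + dyA.getD k 0) := hI1.agreeF _ hwIn hbw
            unfold Qual gg at *
            rw [e1, e2]
            exact hQw
          · -- already visited: the ok=false bookkeeping says it has no qualifying neighbour
            rcases hcells (x + dxA.getD k 0, y + dyA.getD k 0) hwIn hbw with hwq | hwnq
            · exfalso
              have hwne : (x + dxA.getD k 0, y + dyA.getD k 0) ≠ (x, y) := nbr_ne hw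
              rcases List.mem_cons.mp hwq with h | h
              · exact hwne h
              · rw [hqsing] at h; simp at h
            · exact hwnq (x, y) (mem_nbrs_symm hw) (hI1.sIn (x, y) hxy) (qual_symm hQw)
        · exact hnq
      obtain ⟨hI', hO', hq', ha', hm'⟩ := ih stF hIF hOF hmeas
      refine ⟨hI', hO', hq', by rw [ha', haF], ?_⟩
      intro p hp
      exact hm' p (hmF p hp)

-- ---- writeAvg lemmas ----
theorem writeAvg_len (s : List (Int × Int)) (v : Int) (a : List (List Int)) :
    (writeAvg s v a).length = a.length := by
  induction s generalizing a with
  | nil => rfl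
  | cons p s ih => simp only [writeAvg, List.foldl_cons] at *; rw [ih, length_iset]

theorem gg_writeAvg_other (s : List (Int × Int)) (v : Int) (a : List (List Int)) (p : Int × Int)
    (h : ∀ q ∈ s, (q.1.toNat, q.2.toNat) ≠ (p.1.toNat, p.2.toNat)) :
    gg (writeAvg s v a) p = gg a p := by
  induction s generalizing a with
  | nil => rfl
  | cons q s ih =>
    simp only [writeAvg, List.foldl_cons] at *
    rw [ih _ (fun r hr => h r (List.mem_cons_of_mem _ hr))]
    unfold gg
    exact gget_iset_other a q.1 q.2 v p.1 p.2 (h q List.mem_cons_self).symm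

theorem bget_bset_mono (c : List (List Bool)) (x y : Int)
    (hx : x.toNat < c.length) (hy : y.toNat < (c.getD x.toNat []).length)
    (p : Int × Int) (hp : bget c p.1 p.2 = true) : bget (bset c x y) p.1 p.2 = true := by
  by_cases he : (p.1.toNat, p.2.toNat) = (x.toNat, y.toNat)
  · have hs := bget_bset_self c x y hx hy
    unfold bget at hp hs ⊢
    simp at he
    rw [he.1, he.2]; exact hs
  · rw [bget_bset_other c x y p.1 p.2 he]; exact hp

-- ---- one seed round preserves the outer invariant ----
theorem seedStep_oinv (a0 : List (List Int)) (L R : Int)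
    (acc : List (List Int) × List (List Bool) × Bool) (i j : Nat)
    (hi : i < a0.length) (hj : j < a0.length) (hO : OInv a0 L R acc) :
    OInv a0 L R (seedStep a0.length L R acc i j) ∧
    (∀ p : Int × Int, bget acc.2.1 p.1 p.2 = true →
      bget (seedStep a0.length L R acc i j).2.1 p.1 p.2 = true) ∧
    bget (seedStep a0.length L R acc i j).2.1 (i : Int) (j : Int) = true := by
  obtain ⟨aM, c, ok⟩ := acc
  by_cases hc : bget c (i : Int) (j : Int) = false
  · simp only [seedStep, hc, if_true]
    have hIn : InR a0.length ((i : Int), (j : Int)) := ⟨by omega, by omega, by omega, by omega⟩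
    have hxN : (i : Int).toNat < c.length := by
      rw [Int.toNat_natCast, hO.clen]; exact hi
    have hyN : (j : Int).toNat < (c.getD (i : Int).toNat []).length := by
      rw [Int.toNat_natCast, Int.toNat_natCast, hO.crow i hi]; exact hj
    set st0 : BfsSt := ⟨aM, bset c (i : Int) (j : Int),
      [((i : Int), (j : Int))], [((i : Int), (j : Int))],
      gget aM (i : Int) (j : Int), ok⟩ with hst0
    have hI0 : Inv2 a0 L R st0 := by
      refine ⟨?_, ?_, ?_, ?_, ?_, ?_, ?_, ?_, ?_⟩
      · simp only [hst0]; rw [length_bset]; exact hO.clen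
      · intro i' hi'; simp only [hst0]; rw [rowlen_bset]; exact hO.crow i' hi'
      · exact hO.alen
      · intro p hpIn hp
        simp only [hst0] at hp ⊢
        apply hO.agreeF p hpIn
        by_cases he : (p.1.toNat, p.2.toNat) = ((i : Int).toNat, (j : Int).toNat)
        · exfalso
          have hs := bget_bset_self c (i : Int) (j : Int) hxN hyN
          unfold bget at hp hs
          simp only [Prod.mk.injEq] at he
          rw [he.1, he.2] at hp
          rw [hp] at hs; exact Bool.false_ne_true hs
        · rw [bget_bset_other c (i : Int) (j : Int) p.1 p.2 he] at hp; exact hp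
      · intro p hp
        simp only [hst0, List.mem_singleton] at hp
        subst hp
        exact hO.agreeF _ hIn hc
      · intro p hp; exact hp
      · intro p hp
        simp only [hst0, List.mem_singleton] at hp
        subst hp; exact hIn
      · intro p hp
        simp only [hst0, List.mem_singleton] at hp
        subst hp
        exact bget_bset_self c (i : Int) (j : Int) hxN hyN
      · exact hO.okS
    have hO0 : OkF a0 L R st0 := by
      intro hok
      refine ⟨by simp [hst0], ?_⟩
      intro p hpIn hp
      by_cases he : (p.1.toNat, p.2.toNat) = ((i : Int).toNat, (j : Int).toNat)
      · left
        have : p = ((i : Int), (j : Int)) := inr_inj hpIn hIn (by rw [he])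
        simp [hst0, this]
      · right
        simp only [hst0] at hp
        rw [bget_bset_other c (i : Int) (j : Int) p.1 p.2 he] at hp
        exact hO.okF hok p hpIn hp
    obtain ⟨hI', hO', hq', ha', hm'⟩ :=
      while_main a0 L R (falseCount st0.c + st0.q.length + 1) st0 hI0 hO0 (by omega)
    set st' := whileLoop a0.length L R (falseCount st0.c + st0.q.length + 1) st0 with hst'
    refine ⟨⟨hI'.clen, hI'.crow, ?_, ?_, hI'.okS, ?_⟩, ?_, ?_⟩
    · simp only; rw [writeAvg_len]; exact hI'.alen
    · -- agreeF for the written board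
      intro p hpIn hp
      simp only at hp ⊢
      have hnotin : ∀ q ∈ st'.s, (q.1.toNat, q.2.toNat) ≠ (p.1.toNat, p.2.toNat) := by
        intro q hq he
        have hqIn := hI'.sIn q hq
        have : q = p := inr_inj hqIn hpIn (by rw [he])
        subst this
        rw [hI'.sMark q hq] at hp
        simp at hp
      rw [gg_writeAvg_other st'.s _ st'.a p hnotin]
      exact hI'.agreeF p hpIn hp
    · -- okF
      intro hok p hpIn hp
      simp only at hok hp
      rcases (hO' hok).2 p hpIn hp with hmem | hnq
      · rw [hq'] at hmem; simp at hmem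
      · exact hnq
    · -- monotone
      intro p hp
      apply hm'
      simp only [hst0]
      exact bget_bset_mono c (i : Int) (j : Int) hxN hyN p hp
    · -- the seeded cell is marked
      exact hm' ((i : Int), (j : Int)) (bget_bset_self c (i : Int) (j : Int) hxN hyN)
  · simp only [seedStep, hc]
    have hT : bget c (i : Int) (j : Int) = true := by
      cases h : bget c (i : Int) (j : Int)
      · exact absurd h hc
      · rfl
    exact ⟨hO, fun _ h => h, hT⟩

-- ---- folding seed rounds over a list of positions ----
theorem seedFold_mono (a0 : List (List Int)) (L R : Int) (ps : List (Nat × Nat))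
    (acc : List (List Int) × List (List Bool) × Bool)
    (hps : ∀ p ∈ ps, p.1 < a0.length ∧ p.2 < a0.length) (hO : OInv a0 L R acc) :
    OInv a0 L R (ps.foldl (fun acc p => seedStep a0.length L R acc p.1 p.2) acc) ∧
    ∀ r : Int × Int, bget acc.2.1 r.1 r.2 = true →
      bget (ps.foldl (fun acc p => seedStep a0.length L R acc p.1 p.2) acc).2.1 r.1 r.2 = true := by
  induction ps generalizing acc with
  | nil => exact ⟨hO, fun _ h => h⟩
  | cons p ps ih =>
    obtain ⟨hp1, hp2⟩ := hps p List.mem_cons_self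
    obtain ⟨hO1, hmono1, _⟩ := seedStep_oinv a0 L R acc p.1 p.2 hp1 hp2 hO
    obtain ⟨hO2, hmono2⟩ := ih (seedStep a0.length L R acc p.1 p.2)
      (fun q hq => hps q (List.mem_cons_of_mem _ hq)) hO1
    exact ⟨hO2, fun r hr => hmono2 r (hmono1 r hr)⟩

theorem seedFold_marks (a0 : List (List Int)) (L R : Int) (ps : List (Nat × Nat))
    (acc : List (List Int) × List (List Bool) × Bool)
    (hps : ∀ p ∈ ps, p.1 < a0.length ∧ p.2 < a0.length) (hO : OInv a0 L R acc) :
    ∀ p ∈ ps, bget (ps.foldl (fun acc p => seedStep a0.length L R acc p.1 p.2) acc).2.1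
      (p.1 : Int) (p.2 : Int) = true := by
  induction ps generalizing acc with
  | nil => simp
  | cons p ps ih =>
    obtain ⟨hp1, hp2⟩ := hps p List.mem_cons_self
    obtain ⟨hO1, hmono1, hmark1⟩ := seedStep_oinv a0 L R acc p.1 p.2 hp1 hp2 hO
    intro q hq
    simp only [List.foldl_cons]
    rcases List.mem_cons.mp hq with rfl | hq
    · obtain ⟨_, hmono2⟩ := seedFold_mono a0 L R ps (seedStep a0.length L R acc q.1 q.2)
        (fun r hr => hps r (List.mem_cons_of_mem _ hr)) hO1
      exact hmono2 ((q.1 : Int), (q.2 : Int)) hmark1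
    · exact ih (seedStep a0.length L R acc p.1 p.2)
        (fun r hr => hps r (List.mem_cons_of_mem _ hr)) hO1 q hq

-- fold over a flatMap is the nested fold
theorem foldl_flatMap' {α β γ : Type} (l : List α) (f : α → List β) (g : γ → β → γ) (init : γ) :
    (l.flatMap f).foldl g init = l.foldl (fun acc x => (f x).foldl g acc) init := by
  induction l generalizing init with
  | nil => rfl
  | cons a l ih => simp only [List.flatMap_cons, List.foldl_append, List.foldl_cons, ih]

theorem getD_replicate' {α : Type} (n : Nat) (a : α) (i : Nat) (d : α) :
    (List.replicate n a).getD i d = if i < n then a else d := by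
  rw [List.getD_eq_getElem?_getD, List.getElem?_replicate]
  split_ifs <;> rfl

theorem bget_init (n : Nat) (x y : Int) :
    bget (List.replicate n (List.replicate n false)) x y = false := by
  unfold bget
  rw [getD_replicate']
  split_ifs
  · rw [getD_replicate']; split_ifs <;> rfl
  · rfl

theorem pre_bfs_eq_hasPair (a : List (List Int)) (L R : Int) :
    bfs a L R = true ↔ HasPair a L R := by
  set n := a.length with hn
  set init : List (List Int) × List (List Bool) × Bool :=
    (a, List.replicate n (List.replicate n false), false) with hinit
  set pairs : List (Nat × Nat) :=
    (List.range n).flatMap (fun i => (List.range n).map (fun j => (i, j))) with hpairs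
  have hfold : (List.range n).foldl
      (fun acc i => (List.range n).foldl (fun acc j => seedStep n L R acc i j) acc) init
      = pairs.foldl (fun acc p => seedStep n L R acc p.1 p.2) init := by
    rw [hpairs, foldl_flatMap']
    congr 1
    funext acc i
    rw [List.foldl_map]
  have hOinit : OInv a L R init := by
    refine ⟨by simp [hinit, hn], ?_, rfl, fun p _ _ => rfl, ?_, ?_⟩
    · intro i hi
      simp only [hinit]
      rw [getD_replicate', if_pos (by omega)]
      simp [hn]
    · intro hok
      simp [hinit] at hok
    · intro _ p _ hpT
      exfalso
      have hb := bget_init n p.1 p.2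
      simp only [hinit] at hpT
      rw [hb] at hpT
      exact Bool.false_ne_true hpT
  have hbnd : ∀ p ∈ pairs, p.1 < a.length ∧ p.2 < a.length := by
    intro p hp
    rw [hpairs] at hp
    simp only [List.mem_flatMap, List.mem_map, List.mem_range] at hp
    obtain ⟨i, hi, j, hj, hpe⟩ := hp
    subst hpe
    exact ⟨by omega, by omega⟩
  obtain ⟨hO, _⟩ := seedFold_mono a L R pairs init hbnd hOinit
  have hmarks := seedFold_marks a L R pairs init hbnd hOinit
  have hbody : bfs a L R = ((List.range n).foldl
      (fun acc i => (List.range n).foldl (fun acc j => seedStep n L R acc i j) acc) init).2.2 := rfl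
  rw [hbody, hfold]
  set res := pairs.foldl (fun acc p => seedStep n L R acc p.1 p.2) init with hres
  constructor
  · exact fun h => hO.okS h
  · intro hp
    cases hv : res.2.2
    · exfalso
      obtain ⟨p, q, hpIn, hqIn, hmem, hQ⟩ := hp
      have hmem' : (p.1.toNat, p.2.toNat) ∈ pairs := by
        simp only [hpairs, List.mem_flatMap, List.mem_map, List.mem_range]
        obtain ⟨h1, h2, h3, h4⟩ := hpIn
        exact ⟨p.1.toNat, by omega, p.2.toNat, by omega, rfl⟩
      have hmark := hmarks _ hmem'
      have hmark' : bget res.2.1 p.1 p.2 = true := by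
        have he := inr_eta hpIn
        rw [show ((p.1.toNat, p.2.toNat).1 : Int) = (p.1.toNat : Int) from rfl] at hmark
        rw [show ((p.1.toNat, p.2.toNat).2 : Int) = (p.2.toNat : Int) from rfl] at hmark
        obtain ⟨h1, _, h3, _⟩ := hpIn
        rw [Int.toNat_of_nonneg h1, Int.toNat_of_nonneg h3] at hmark
        exact hmark
      exact hO.okF hv p hpIn hmark' q hmem hqIn hQ
    · rfl

theorem pre_alt_eq_hasPair (a : List (List Int)) (L R : Int) :
    bfs_alt a L R = true ↔ HasPair a L R := by
  unfold bfs_alt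
  simp only [List.any_eq_true, List.mem_range, Bool.or_eq_true, Bool.and_eq_true,
    decide_eq_true_eq, nearB]
  constructor
  · rintro ⟨i, hi, j, hj, h⟩
    rcases h with ⟨hj1, h1, h2⟩ | ⟨hi1, h1, h2⟩
    · exact ⟨((i : Int), (j : Int)), ((i : Int), (j : Int) + 1),
        ⟨by omega, by omega, by omega, by omega⟩,
        ⟨by omega, by omega, by omega, by omega⟩,
        by simp [nbrsOf], ⟨h1, h2⟩⟩
    · exact ⟨((i : Int), (j : Int)), ((i : Int) + 1, (j : Int)),
        ⟨by omega, by omega, by omega, by omega⟩,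
        ⟨by omega, by omega, by omega, by omega⟩,
        by simp [nbrsOf], ⟨h1, h2⟩⟩
  · rintro ⟨p, q, hpIn, hqIn, hmem, hQ⟩
    obtain ⟨p1, p2⟩ := p
    obtain ⟨q1, q2⟩ := q
    obtain ⟨a1, a2, a3, a4⟩ := hpIn
    obtain ⟨b1, b2, b3, b4⟩ := hqIn
    simp only at a1 a2 a3 a4 b1 b2 b3 b4
    simp only [nbrsOf, List.mem_cons, Prod.mk.injEq] at hmem
    have e1 : ((p1.toNat : Int)) = p1 := Int.toNat_of_nonneg a1
    have e2 : ((p2.toNat : Int)) = p2 := Int.toNat_of_nonneg a3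
    have f1 : ((q1.toNat : Int)) = q1 := Int.toNat_of_nonneg b1
    have f2 : ((q2.toNat : Int)) = q2 := Int.toNat_of_nonneg b3
    unfold gg Qual at hQ
    simp only at hQ
    rcases hmem with ⟨hh1, hh2⟩ | ⟨hh1, hh2⟩ | ⟨hh1, hh2⟩ | ⟨hh1, hh2⟩ | hfalse
    · -- q = (p1 + 1, p2): down pair based at p
      rw [hh1, hh2] at hQ
      refine ⟨p1.toNat, by omega, p2.toNat, by omega, Or.inr ⟨by omega, ?_, ?_⟩⟩
      · rw [e1, e2]; exact hQ.1
      · rw [e1, e2]; exact hQ.2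
    · -- q = (p1 - 1, p2): down pair based at q
      have hQ' : L ≤ |gget a q1 q2 - gget a p1 p2| ∧ |gget a q1 q2 - gget a p1 p2| ≤ R :=
        qual_symm (⟨hQ.1, hQ.2⟩ : Qual L R (gget a p1 p2) (gget a q1 q2))
      have hp1 : p1 = q1 + 1 := by omega
      have hp2 : p2 = q2 := by omega
      rw [hp1, hp2] at hQ'
      refine ⟨q1.toNat, by omega, q2.toNat, by omega, Or.inr ⟨by omega, ?_, ?_⟩⟩
      · rw [f1, f2]; exact hQ'.1
      · rw [f1, f2]; exact hQ'.2
    · -- q = (p1, p2 + 1): right pair based at p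
      rw [hh1, hh2] at hQ
      refine ⟨p1.toNat, by omega, p2.toNat, by omega, Or.inl ⟨by omega, ?_, ?_⟩⟩
      · rw [e1, e2]; exact hQ.1
      · rw [e1, e2]; exact hQ.2
    · -- q = (p1, p2 - 1): right pair based at q
      have hQ' : L ≤ |gget a q1 q2 - gget a p1 p2| ∧ |gget a q1 q2 - gget a p1 p2| ≤ R :=
        qual_symm (⟨hQ.1, hQ.2⟩ : Qual L R (gget a p1 p2) (gget a q1 q2))
      have hp1 : p1 = q1 := by omega
      have hp2 : p2 = q2 + 1 := by omega
      rw [hp1, hp2] at hQ'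
      refine ⟨q1.toNat, by omega, q2.toNat, by omega, Or.inl ⟨by omega, ?_, ?_⟩⟩
      · rw [f1, f2]; exact hQ'.1
      · rw [f1, f2]; exact hQ'.2
    · simp at hfalse

theorem bfs_eq_hasPair (a : List (List Int)) (L R : Int) :
    bfs a L R = true ↔ HasPair a L R := pre_bfs_eq_hasPair a L R

theorem bfs_alt_eq_hasPair (a : List (List Int)) (L R : Int) :
    bfs_alt a L R = true ↔ HasPair a L R := pre_alt_eq_hasPair a L R

-- ===== VERDICT (by name: the statement is the Claim_ definition above) =====
theorem bfs_spec : Claim_equal_bfs := by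
  intro a L R _ _
  unfold Spec_bfs
  have h1 := bfs_eq_hasPair a L R
  have h2 := bfs_alt_eq_hasPair a L R
  cases hb : bfs a L R <;> cases hb' : bfs_alt a L R <;> simp_all
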